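-- pv_equiv track=rewrite | github.com/uvsq22003726/l1-python | TD04_listes/carreMagique.py | estNormal
-- ===== SOURCE A (Python) =====
-- def estNormal(carre):
--     """ Retourne True si contient toutes les valeurs de 1 à n^2 où n est la taille
--         du carré, et False sinon """
--     n = len(carre)
--     listeEntiers = [i for i in range(1,n*n+1)]
--     for ligne in carre:
--         for case in ligne:
--             if case in listeEntiers:
--                 listeEntiers.remove(case)
--     if len(listeEntiers) == 0:
--         return True
--     else:
--         return False
-- ===== SOURCE B (Python) =====
-- def estNormal(carre):
--     """ Retourne True si contient toutes les valeurs de 1 à n^2 où n est la taille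
--         du carré, et False sinon """
--     vals = set()
--     for ligne in carre:
--         for case in ligne:
--             vals.add(case)
--     n = len(carre)
--     return all(v in vals for v in range(1, n * n + 1))
-- ===== Notes on version B (the rewrite author's own statement) =====
-- stated objective: simpler
-- what changed: B collects the grid values into a set in one pass and then iterates over the required range 1..n*n testing membership, instead of A's pass over grid cells that removes each found value from a shrinking list of targets and tests its final length.
import Mathlib
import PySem

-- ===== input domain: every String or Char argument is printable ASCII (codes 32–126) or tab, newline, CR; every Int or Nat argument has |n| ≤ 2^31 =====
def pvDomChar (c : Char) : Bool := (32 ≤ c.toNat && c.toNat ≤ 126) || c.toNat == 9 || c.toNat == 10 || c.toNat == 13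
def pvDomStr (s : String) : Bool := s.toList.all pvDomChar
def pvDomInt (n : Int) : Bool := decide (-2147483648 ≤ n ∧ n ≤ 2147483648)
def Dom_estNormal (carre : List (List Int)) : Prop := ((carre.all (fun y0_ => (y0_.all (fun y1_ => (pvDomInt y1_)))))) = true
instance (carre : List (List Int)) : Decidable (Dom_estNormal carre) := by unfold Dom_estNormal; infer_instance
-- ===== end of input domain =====

-- B builds a set of the grid's values once and tests membership of each required value 1..n²,
-- instead of A's removal from a shrinking list of targets (return value equivalence; simpler pass shape).

-- ===== PORT A =====
def estNormal (carre : List (List Int)) : Bool :=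
  let n : Int := carre.length
  let listeEntiers : List Int := PySem.List.pyRange 1 (n * n + 1) 1
  let final : List Int := carre.foldl (fun l ligne =>
    ligne.foldl (fun l case =>
      if case ∈ l then (PySem.List.remove? l case).getD l else l) l) listeEntiers
  if final.length = 0 then true else false

-- ===== PORT B =====
def estNormal_alt (carre : List (List Int)) : Bool :=
  let vals : PySem.Set Int := carre.foldl (fun s ligne =>
    ligne.foldl (fun s case => PySem.Set.add s case) s) PySem.Set.empty
  let n : Int := carre.length
  (PySem.List.pyRange 1 (n * n + 1) 1).all (fun v => decide (v ∈ vals))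

-- ===== PRECONDITION & SPEC =====
def Spec_estNormal (carre : List (List Int)) (out : Bool) : Prop := out = estNormal_alt carre
instance (carre : List (List Int)) (out : Bool) : Decidable (Spec_estNormal carre out) := by unfold Spec_estNormal; infer_instance

-- ===== CLAIM (what is proved, stated in full; the proofs are below) =====
def Claim_equal_estNormal : Prop := ∀ (carre : List (List Int)), Dom_estNormal carre → Spec_estNormal carre (estNormal carre)

-- ===== LEMMAS AND PROOFS =====

-- nested loop over rows then cells = loop over the flattened cell list
theorem foldl_foldl_flatMap {α β : Type} (f : β → α → β) :
    ∀ (rows : List (List α)) (init : β),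
      rows.foldl (fun b row => row.foldl f b) init = (rows.flatMap id).foldl f init := by
  intro rows
  induction rows with
  | nil => intro init; simp
  | cons r rs ih => intro init; simp [List.foldl_append, ih]

-- A's loop body is List.erase (remove only fires when the element is present)
theorem stepA_eq_erase (l : List Int) (c : Int) :
    (if c ∈ l then (PySem.List.remove? l c).getD l else l) = l.erase c := by
  by_cases h : c ∈ l
  · simp [h, PySem.List.remove?_eq_some_erase l c h]
  · simp [h, List.erase_of_not_mem h]

-- folding erase over the cells on a duplicate-free target list filters out the seen cells
theorem foldl_erase_filter :
    ∀ (cs l : List Int), l.Nodup →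
      cs.foldl List.erase l = l.filter (fun x => decide (x ∉ cs)) := by
  intro cs
  induction cs with
  | nil => intro l _; simp
  | cons c cs ih =>
      intro l hl
      have h1 : l.erase c = l.filter (fun x => decide (x ≠ c)) := by
        simpa using hl.erase_eq_filter c
      calc (c :: cs).foldl List.erase l = cs.foldl List.erase (l.erase c) := rfl
        _ = (l.erase c).filter (fun x => decide (x ∉ cs)) := ih _ (hl.erase c)
        _ = l.filter (fun x => decide (x ∉ c :: cs)) := by
              rw [h1, List.filter_filter]
              apply List.filter_congr
              intro x _
              by_cases h1 : x = c <;> by_cases h2 : x ∈ cs <;> simp [h1, h2]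

-- membership in B's accumulated set = membership in the cell list
theorem mem_foldl_add :
    ∀ (cs : List Int) (s : PySem.Set Int) (x : Int),
      x ∈ cs.foldl (fun s c => PySem.Set.add s c) s ↔ x ∈ s ∨ x ∈ cs := by
  intro cs
  induction cs with
  | nil => intro s x; simp
  | cons c cs ih =>
      intro s x
      simp only [List.foldl_cons, ih, PySem.Set.mem_add, List.mem_cons]
      tauto

-- ===== VERDICT (by name: the statement is the Claim_ definition above) =====
theorem estNormal_spec : Claim_equal_estNormal := by
  intro carre _
  unfold Spec_estNormal estNormal estNormal_alt
  simp only [foldl_foldl_flatMap]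
  set cs : List Int := carre.flatMap id with hcs
  set targets : List Int := PySem.List.pyRange 1 ((carre.length : Int) * carre.length + 1) 1 with ht
  have hstep : (fun (l : List Int) (case : Int) =>
      if case ∈ l then (PySem.List.remove? l case).getD l else l) = List.erase := by
    funext l c; exact stepA_eq_erase l c
  have hnodup : targets.Nodup := by rw [ht]; exact PySem.List.nodup_pyRange_one 1 _
  rw [hstep, foldl_erase_filter cs targets hnodup]
  by_cases hall : ∀ v ∈ targets, v ∈ cs
  · -- every required value occurs among the cells: both sides are true
    have hfil : targets.filter (fun x => decide (x ∉ cs)) = [] := by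
      rw [List.filter_eq_nil_iff]
      intro v hv
      simp [hall v hv]
    rw [hfil]
    simp only [List.length_nil, if_true]
    symm
    rw [List.all_eq_true]
    intro v hv
    simp [mem_foldl_add, hall v hv]
  · -- some required value is missing: both sides are false
    push Not at hall
    obtain ⟨v, hv1, hv2⟩ := hall
    have hfil : (targets.filter (fun x => decide (x ∉ cs))).length ≠ 0 := by
      simp only [ne_eq, List.length_eq_zero_iff, List.filter_eq_nil_iff, not_forall]
      exact ⟨v, hv1, by simp [hv2]⟩
    rw [if_neg hfil]
    symm
    rw [List.all_eq_false]
    exact ⟨v, hv1, by simp [mem_foldl_add, PySem.Set.empty, hv2]⟩
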